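-- pv_equiv track=rewrite | github.com/qja1998/boj | 백준/Gold/9519. 졸려/졸려.py | search
-- ===== SOURCE A (Python) =====
-- import math
--
-- def suffle(s):
--     s_list = list(s)
--     split_i = math.ceil(len(s)/2)
--     front = list(s[:split_i])
--     back = list(s[split_i:])[::-1]
--
--     s_list[::2] = front
--     s_list[1::2] = back
--
--     return ''.join(s_list)
--
-- def search(s):
--     origin_s = s
--
--     word_list = [origin_s]
--     while True:
--         s = suffle(s)
--         if origin_s == s:
--             break
--         word_list.append(s)
--
--     return len(word_list), word_list
-- ===== SOURCE B (Python) =====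
-- import math
--
-- def search(s):
--     n = len(s)
--     perm = [k // 2 if k % 2 == 0 else n - 1 - k // 2 for k in range(n)]
--
--     def orbit(i):
--         # [i, perm(i), perm^2(i), ...] up to (excluding) the return to i
--         c = [i]
--         j = perm[i]
--         while j != i:
--             c.append(j)
--             j = perm[j]
--         return c
--
--     cycles = []
--     loc = {}              # index -> (characters along its cycle, its position in the cycle)
--     for i in range(n):
--         if i not in loc:
--             c = orbit(i)
--             cycles.append(c)
--             cs = ''.join(s[j] for j in c)
--             for t in range(len(c)):
--                 loc[c[t]] = (cs, t)
--
--     def period(c):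
--         # minimal rotation period of the characters along cycle c (it divides len(c))
--         chars = [s[j] for j in c]
--         L = len(chars)
--         return next(d for d in range(1, L + 1)
--                     if L % d == 0 and all(chars[(t + d) % L] == chars[t] for t in range(L)))
--
--     # number of distinct words = lcm of the per-cycle character periods
--     count = 1
--     for c in cycles:
--         count = math.lcm(count, period(c))
--
--     # word k has s[perm^k(i)] at position i: column i is cs rotated forward from pos,
--     # read off a repeated copy of cs; the words are the rows of the column matrix
--     cols = []
--     for i in range(n):
--         cs, t = loc[i]
--         L = len(cs)
--         cols.append((cs * (count // L + 2))[t : t + count])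
--     # (no columns at all — the empty word — still yields `count` rows)
--     words = [''.join(row) for row in zip(*cols)] if cols else [''] * count
--     return count, words
-- ===== Notes on version B (the rewrite author's own statement) =====
-- stated objective: alternative
-- what changed: Instead of A's repeated application of the shuffle to the string until it returns to the original, B decomposes the index permutation into cycles, computes the word count as the lcm of the minimal rotation periods of the characters along each cycle, and builds all words at once as the rows of per-position columns sliced from repeated cycle strings.
import Mathlib
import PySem

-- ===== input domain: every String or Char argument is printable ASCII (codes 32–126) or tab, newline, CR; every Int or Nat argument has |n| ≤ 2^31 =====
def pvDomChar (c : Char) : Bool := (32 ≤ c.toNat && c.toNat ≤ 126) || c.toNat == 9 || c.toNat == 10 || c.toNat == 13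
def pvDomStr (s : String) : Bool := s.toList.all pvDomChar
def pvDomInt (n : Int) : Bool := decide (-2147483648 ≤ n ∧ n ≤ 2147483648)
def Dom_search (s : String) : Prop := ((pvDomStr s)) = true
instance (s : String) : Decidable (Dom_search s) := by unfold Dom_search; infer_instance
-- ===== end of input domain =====

-- B replaces A's iterated string shuffling by cycle decomposition of the index permutation:
-- the number of words is the lcm of the minimal rotation periods of the characters along each
-- cycle, and each word is read off the cycles directly (objective: alternative algorithm).
-- A's loop port carries fuel n!+1; the proof shows the loop stops strictly before exhaustion.

-- ===== PORT A =====
-- s_list[::2] = vs  (replace positions 0,2,4,…; in A the value list always has exactly that length)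
def assignStep2 : List Char → List Char → List Char
  | xs, [] => xs
  | [], _ => []
  | [_], v :: _ => [v]
  | _ :: y :: xs, v :: vs => v :: y :: assignStep2 xs vs

-- s_list[1::2] = vs  (replace positions 1,3,5,…)
def assignOdd (xs vs : List Char) : List Char :=
  match xs with
  | [] => []
  | x :: rest => x :: assignStep2 rest vs

def suffle (s : String) : String :=
  let sList := s.toList                              -- s_list = list(s)
  let splitI := (sList.length + 1) / 2               -- math.ceil(len(s)/2)  (exact on this domain)
  let front := sList.take splitI                     -- front = list(s[:split_i])
  let back := (sList.drop splitI).reverse            -- back = list(s[split_i:])[::-1]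
  let step1 := assignStep2 sList front               -- s_list[::2] = front
  let step2 := assignOdd step1 back                  -- s_list[1::2] = back
  String.ofList step2                                -- ''.join(s_list)

-- the while-True loop of A; the fuel n!+1 is never exhausted (proved below)
def searchLoopA : Nat → String → String → List String → List String
  | 0, _, _, acc => acc
  | fuel + 1, origin, s, acc =>
    let s' := suffle s
    if origin == s' then acc else searchLoopA fuel origin s' (acc ++ [s'])

def search (s : String) : Int × List String :=
  let wordList := searchLoopA (Nat.factorial s.toList.length + 1) s s [s]
  ((wordList.length : Int), wordList)

-- ===== PORT B =====
-- perm = [k // 2 if k % 2 == 0 else n - 1 - k // 2 for k in range(n)]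
def permOf (n : Nat) : List Nat :=
  (List.range n).map (fun k => if k % 2 == 0 then k / 2 else n - 1 - k / 2)

-- the `while j != i` body of Source B's orbit; fuel len(perm) suffices (cycle length ≤ n)
def orbitAux (perm : List Nat) (i : Nat) : Nat → Nat → List Nat
  | 0, _ => []
  | fuel + 1, j => if j == i then [] else j :: orbitAux perm i fuel (perm.getD j 0)

-- orbit(i) = [i, perm(i), perm²(i), …] up to (excluding) the return to i
def orbit (perm : List Nat) (i : Nat) : List Nat :=
  i :: orbitAux perm i perm.length (perm.getD i 0)

-- next(d for d in range(1, L+1) if L % d == 0 and all(chars[(t+d)%L] == chars[t] for t in range(L)));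
-- d = L always qualifies, so find? is some and the .getD default is never used
def periodOf (chars : List Char) : Nat :=
  (((List.range' 1 chars.length).find? (fun d =>
      chars.length % d == 0 &&
      (List.range chars.length).all (fun t =>
        chars.getD ((t + d) % chars.length) 'a' == chars.getD t 'a'))).getD chars.length)

-- the body of Source B's decomposition loop: if i not in loc, record i's cycle and, for
-- every member, its (cycle characters, position) entry; the Python string cs is
-- modelled exactly by its list of characters
def buildStep (l : List Char) (perm : List Nat)
    (st : List (List Nat) × PySem.Dict Nat (List Char × Nat)) (i : Nat) :
    List (List Nat) × PySem.Dict Nat (List Char × Nat) :=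
  if (st.2.get? i).isNone then
    let c := orbit perm i
    let cs := c.map (fun j => l.getD j 'a')
    (st.1 ++ [c], (List.range c.length).foldl (fun d t => d.insert (c.getD t 0) (cs, t)) st.2)
  else st

-- cycles = []; loc = {}; for i in range(n): …
def buildCycles (l : List Char) (perm : List Nat) (n : Nat) :
    List (List Nat) × PySem.Dict Nat (List Char × Nat) :=
  (List.range n).foldl (buildStep l perm) ([], PySem.Dict.empty)

-- count = 1; for c in cycles: count = math.lcm(count, period(c))
def altCount (l : List Char) (cycles : List (List Nat)) : Nat :=
  cycles.foldl (fun a c => Nat.lcm a (periodOf (c.map (fun j => l.getD j 'a')))) 1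

-- (cs * (count // L + 2))[t : t + count]: the slice is in range, so it is drop/take of
-- the repeated string (exact); loc has an entry for every i < n, so the .getD default
-- ([], 0) is never used (KeyError impossible)
def colOf (loc : PySem.Dict Nat (List Char × Nat)) (count i : Nat) : List Char :=
  let ct := (loc.get? i).getD ([], 0)
  let L := ct.1.length
  ((((List.replicate (count / L + 2) ct.1).flatten).drop ct.2).take count)

-- words = [''.join(row) for row in zip(*cols)] if cols else [''] * count:
-- every column has length exactly `count`, so row k collects the k-th character of
-- every column (exact port of zip over equal-length columns)
def altWords (loc : PySem.Dict Nat (List Char × Nat)) (n count : Nat) : List String :=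
  let cols := (List.range n).map (fun i => colOf loc count i)
  if cols.isEmpty then List.replicate count ""
  else (List.range count).map (fun k => String.ofList (cols.map (fun col => col.getD k ' ')))

def search_alt (s : String) : Int × List String :=
  let l := s.toList
  let st := buildCycles l (permOf l.length) l.length
  let count := altCount l st.1
  ((count : Int), altWords st.2 l.length count)

-- ===== PRECONDITION & SPEC =====
def Spec_search (s : String) (out : Int × List String) : Prop := out = search_alt s
instance (s : String) (out : Int × List String) : Decidable (Spec_search s out) := by unfold Spec_search; infer_instance

-- ===== CLAIM (what is proved, stated in full; the proofs are below) =====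
def Claim_equal_search : Prop := ∀ (s : String), Dom_search s → Spec_search s (search s)

-- ===== LEMMAS AND PROOFS =====

-- ---- the index permutation and its iterates (proof-only) ----
def pfun (n k : Nat) : Nat := if k % 2 = 0 then k / 2 else n - 1 - k / 2

def pit (n : Nat) : Nat → Nat → Nat
  | 0, i => i
  | k + 1, i => pfun n (pit n k i)

theorem pfun_lt {n i : Nat} (h : i < n) : pfun n i < n := by
  unfold pfun; split <;> omega

theorem pfun_inj {n a b : Nat} (ha : a < n) (hb : b < n) (h : pfun n a = pfun n b) : a = b := by
  unfold pfun at h; split at h <;> split at h <;> omega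

theorem pit_lt {n i : Nat} (k : Nat) (h : i < n) : pit n k i < n := by
  induction k with
  | zero => exact h
  | succ k ih => exact pfun_lt ih

theorem pit_add (n a b i : Nat) : pit n (a + b) i = pit n a (pit n b i) := by
  induction a with
  | zero => simp [pit]
  | succ a ih => simp only [Nat.succ_add, pit, ih]

theorem pit_comm (n k i : Nat) : pit n k (pfun n i) = pfun n (pit n k i) := by
  induction k with
  | zero => rfl
  | succ k ih => simp only [pit, ih]

theorem pit_cancel {n a : Nat} : ∀ {i j : Nat}, i < n → j < n → pit n a i = pit n a j → i = j := by
  induction a with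
  | zero => intro i j _ _ h; exact h
  | succ a ih =>
    intro i j hi hj h
    exact ih hi hj (pfun_inj (pit_lt a hi) (pit_lt a hj) h)

theorem exists_cyc {n i : Nat} (h : i < n) : ∃ c, 0 < c ∧ c ≤ n ∧ pit n c i = i := by
  obtain ⟨a, ha, b, hb, hne, heq⟩ :=
    Finset.exists_ne_map_eq_of_card_lt_of_maps_to
      (s := Finset.range (n + 1)) (t := Finset.range n) (by simp)
      (fun t _ => Finset.mem_range.2 (pit_lt t h))
  simp only [Finset.mem_range] at ha hb
  rcases Nat.lt_or_ge a b with hab | hab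
  · refine ⟨b - a, by omega, by omega, ?_⟩
    have : pit n a i = pit n a (pit n (b - a) i) := by
      rw [← pit_add, show a + (b - a) = b by omega, heq]
    exact (pit_cancel h (pit_lt _ h) this).symm
  · have hba : b < a := by omega
    refine ⟨a - b, by omega, by omega, ?_⟩
    have : pit n b i = pit n b (pit n (a - b) i) := by
      rw [← pit_add, show b + (a - b) = a by omega, ← heq]
    exact (pit_cancel h (pit_lt _ h) this).symm

-- minimal positive c with pit n c i = i (cycle length of i)
def cyc (n i : Nat) : Nat :=
  if h : i < n then
    have h2 : ∃ c, 0 < c ∧ pit n c i = i :=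
      Exists.imp (fun _ hc => And.intro hc.1 hc.2.2) (exists_cyc h)
    Nat.find h2
  else 1

theorem cyc_spec {n i : Nat} (h : i < n) :
    0 < cyc n i ∧ pit n (cyc n i) i = i := by
  have h2 : ∃ c, 0 < c ∧ pit n c i = i :=
    Exists.imp (fun _ hc => And.intro hc.1 hc.2.2) (exists_cyc h)
  unfold cyc; rw [dif_pos h]; exact Nat.find_spec h2

theorem cyc_min {n i : Nat} (h : i < n) {c : Nat} (hc : 0 < c) (hlt : c < cyc n i) :
    pit n c i ≠ i := by
  have h2 : ∃ c, 0 < c ∧ pit n c i = i :=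
    Exists.imp (fun _ hc => And.intro hc.1 hc.2.2) (exists_cyc h)
  unfold cyc at hlt; rw [dif_pos h] at hlt
  intro heq
  exact Nat.find_min h2 hlt ⟨hc, heq⟩

theorem cyc_le {n i : Nat} (h : i < n) : cyc n i ≤ n := by
  have h2 : ∃ c, 0 < c ∧ pit n c i = i :=
    Exists.imp (fun _ hc => And.intro hc.1 hc.2.2) (exists_cyc h)
  unfold cyc; rw [dif_pos h]
  have hs := (exists_cyc h).choose_spec
  exact le_trans (Nat.find_le (p := fun c => 0 < c ∧ pit n c i = i) ⟨hs.1, hs.2.2⟩) hs.2.1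

theorem pit_mul_cyc {n i : Nat} (h : i < n) (m : Nat) : pit n (m * cyc n i) i = i := by
  induction m with
  | zero => rw [Nat.zero_mul]; rfl
  | succ m ih => rw [Nat.succ_mul, pit_add, (cyc_spec h).2, ih]

theorem pit_mod {n i : Nat} (h : i < n) (k : Nat) : pit n (k % cyc n i) i = pit n k i := by
  conv_rhs => rw [← Nat.mod_add_div k (cyc n i)]
  rw [pit_add, Nat.mul_comm, pit_mul_cyc h]

theorem permOf_length (n : Nat) : (permOf n).length = n := by simp [permOf]

theorem permOf_getD {n j : Nat} (h : j < n) : (permOf n).getD j 0 = pfun n j := by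
  simp [permOf, List.getD_eq_getElem?_getD, pfun, h]

theorem orbitAux_eq {n i : Nat} (hi : i < n) :
    ∀ (fuel t : Nat), 1 ≤ t → t ≤ cyc n i → cyc n i - t ≤ fuel →
      orbitAux (permOf n) i fuel (pit n t i)
        = (List.range' t (cyc n i - t)).map (fun u => pit n u i) := by
  intro fuel
  induction fuel with
  | zero =>
    intro t h1 h2 h3
    have : cyc n i - t = 0 := by omega
    rw [this]
    rfl
  | succ fuel ih =>
    intro t h1 h2 h3
    by_cases heq : pit n t i = i
    · have ht : t = cyc n i := by
        by_contra hne
        exact cyc_min hi (by omega) (by omega) heq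
      simp only [orbitAux, ht, Nat.sub_self, List.range'_zero, List.map_nil]
      simp [(cyc_spec hi).2]
    · have htlt : t < cyc n i := by
        rcases Nat.lt_or_ge t (cyc n i) with h | h
        · exact h
        · exact absurd (by rw [show t = cyc n i by omega]; exact (cyc_spec hi).2) heq
      have hbeq : (pit n t i == i) = false := by simp [heq]
      have hget : (permOf n).getD (pit n t i) 0 = pit n (t + 1) i := by
        rw [permOf_getD (pit_lt t hi)]; rfl
      rw [show cyc n i - t = (cyc n i - (t + 1)) + 1 by omega, List.range'_succ]
      simp only [orbitAux, hbeq, List.map_cons, hget]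
      rw [ih (t + 1) (by omega) (by omega) (by omega)]
      simp

theorem orbit_eq {n i : Nat} (hi : i < n) :
    orbit (permOf n) i = (List.range (cyc n i)).map (fun u => pit n u i) := by
  unfold orbit
  rw [permOf_length, permOf_getD hi, show pfun n i = pit n 1 i from rfl,
    orbitAux_eq hi n 1 (le_refl 1) (cyc_spec hi).1 (by have := cyc_le hi; omega),
    List.range_eq_range', show cyc n i = (cyc n i - 1) + 1 by have := (cyc_spec hi).1; omega,
    List.range'_succ]
  rfl

theorem orbit_length {n i : Nat} (hi : i < n) : (orbit (permOf n) i).length = cyc n i := by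
  rw [orbit_eq hi]; simp

theorem orbit_getD {n i t : Nat} (hi : i < n) (ht : t < cyc n i) :
    (orbit (permOf n) i).getD t 0 = pit n t i := by
  rw [orbit_eq hi]
  rw [List.getD_eq_getElem _ _ (by simpa using ht)]
  simp

-- ---- character periods along a cycle ----
-- Vi l i d: shifting by d along i's cycle leaves the characters unchanged
def Vi (l : List Char) (i d : Nat) : Prop :=
  ∀ t, l.getD (pit l.length (t + d) i) 'a' = l.getD (pit l.length t i) 'a'

theorem Vi_iff_bounded {l : List Char} {i : Nat} (hi : i < l.length) (d : Nat) :
    Vi l i d ↔ ∀ t < cyc l.length i,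
      l.getD (pit l.length (t + d) i) 'a' = l.getD (pit l.length t i) 'a' := by
  constructor
  · intro hv t _
    exact hv t
  · intro hB t
    set n := l.length
    set c := cyc n i with hc
    have hcpos : 0 < c := (cyc_spec hi).1
    have e1 : pit n (t + d) i = pit n (t % c + d) i := by
      rw [← pit_mod hi (t + d), ← pit_mod hi (t % c + d)]
      congr 1
      conv_lhs => rw [Nat.add_mod]
      conv_rhs => rw [Nat.add_mod]
      rw [Nat.mod_mod]
    have e2 : pit n t i = pit n (t % c) i := (pit_mod hi t).symm
    rw [e1, e2]
    exact hB (t % c) (Nat.mod_lt t hcpos)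

theorem Vi_cyc {l : List Char} {i : Nat} (hi : i < l.length) : Vi l i (cyc l.length i) := by
  intro t; rw [pit_add, (cyc_spec hi).2]

theorem Vi_add {l : List Char} {i a b : Nat} (ha : Vi l i a) (hb : Vi l i b) :
    Vi l i (a + b) := by
  intro t
  rw [show t + (a + b) = (t + b) + a by omega, ha (t + b), hb t]

theorem Vi_sub {l : List Char} {i a b : Nat} (ha : Vi l i a) (hab : Vi l i (a + b)) :
    Vi l i b := by
  intro t
  have h1 := ha (t + b)
  have h2 := hab t
  rw [show t + (a + b) = t + b + a by omega] at h2
  rw [← h1, h2]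

theorem exists_Vi {l : List Char} {i : Nat} (hi : i < l.length) :
    ∃ d, 0 < d ∧ ∀ t < cyc l.length i,
      l.getD (pit l.length (t + d) i) 'a' = l.getD (pit l.length t i) 'a' :=
  ⟨cyc l.length i, (cyc_spec hi).1, ((Vi_iff_bounded hi _).1 (Vi_cyc hi))⟩

-- minimal positive rotation period of the characters along i's cycle
def dmin (l : List Char) (i : Nat) : Nat :=
  if h : i < l.length then Nat.find (exists_Vi h) else 1

theorem dmin_pos (l : List Char) (i : Nat) : 0 < dmin l i := by
  unfold dmin; split
  · exact (Nat.find_spec (exists_Vi ‹_›)).1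
  · omega

theorem dmin_Vi {l : List Char} {i : Nat} (hi : i < l.length) : Vi l i (dmin l i) := by
  unfold dmin; rw [dif_pos hi]
  exact (Vi_iff_bounded hi _).2 (Nat.find_spec (exists_Vi hi)).2

theorem dmin_min {l : List Char} {i : Nat} (hi : i < l.length) {e : Nat} (he : 0 < e)
    (hlt : e < dmin l i) : ¬ Vi l i e := by
  unfold dmin at hlt; rw [dif_pos hi] at hlt
  intro hv
  exact Nat.find_min _ hlt ⟨he, (Vi_iff_bounded hi _).1 hv⟩

theorem dmin_le_cyc {l : List Char} {i : Nat} (hi : i < l.length) :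
    dmin l i ≤ cyc l.length i := by
  unfold dmin; rw [dif_pos hi]
  exact Nat.find_le ⟨(cyc_spec hi).1, (Vi_iff_bounded hi _).1 (Vi_cyc hi)⟩

theorem Vi_mul {l : List Char} {i a : Nat} (ha : Vi l i a) (m : Nat) : Vi l i (a * m) := by
  induction m with
  | zero => intro t; rfl
  | succ m ih =>
    have := Vi_add ih ha
    rwa [← Nat.mul_succ] at this

theorem Vi_iff_dvd {l : List Char} {i : Nat} (hi : i < l.length) (k : Nat) :
    Vi l i k ↔ dmin l i ∣ k := by
  constructor
  · intro hv
    set d := dmin l i with hd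
    have hdpos : 0 < d := dmin_pos l i
    have hdvi : Vi l i d := dmin_Vi hi
    have hmul : Vi l i (d * (k / d)) := Vi_mul hdvi _
    have hrem : Vi l i (k % d) := by
      apply Vi_sub hmul
      rwa [Nat.div_add_mod k d]
    rcases Nat.eq_zero_or_pos (k % d) with h0 | hpos
    · exact Nat.dvd_of_mod_eq_zero h0
    · exact absurd hrem (dmin_min hi hpos (Nat.mod_lt k hdpos))
  · rintro ⟨m, rfl⟩
    exact Vi_mul (dmin_Vi hi) m

-- ---- find? on range' picks the least witness ----
theorem find?_range'_eq (P : Nat → Bool) (d : Nat) : ∀ (len a : Nat), a ≤ d → d < a + len →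
    P d = true → (∀ e, a ≤ e → e < d → P e = false) →
    (List.range' a len).find? P = some d := by
  intro len
  induction len with
  | zero => intro a h1 h2; omega
  | succ len ih =>
    intro a h1 h2 hP hmin
    rw [List.range'_succ]
    rcases Nat.eq_or_lt_of_le h1 with rfl | hlt
    · exact List.find?_cons_of_pos hP
    · rw [List.find?_cons_of_neg (by rw [hmin a (le_refl a) hlt]; simp)]
      exact ih (a + 1) hlt (by omega) hP (fun e he1 he2 => hmin e (by omega) he2)

theorem dmin_dvd_cyc {l : List Char} {i : Nat} (hi : i < l.length) :
    dmin l i ∣ cyc l.length i := (Vi_iff_dvd hi _).1 (Vi_cyc hi)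

theorem periodOf_eq {l : List Char} {i : Nat} (hi : i < l.length) :
    periodOf ((orbit (permOf l.length) i).map (fun j => l.getD j 'a')) = dmin l i := by
  set n := l.length with hn
  set c := cyc n i with hc
  set chars := (orbit (permOf n) i).map (fun j => l.getD j 'a') with hchars
  have hclen : chars.length = c := by rw [hchars, List.length_map, orbit_length hi]
  have hcpos : 0 < c := (cyc_spec hi).1
  have hget : ∀ t, t < c → chars.getD t 'a' = l.getD (pit n t i) 'a' := by
    intro t ht
    rw [hchars, List.getD_eq_getElem _ _ (by rw [List.length_map, orbit_length hi]; exact ht)]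
    simp only [List.getElem_map]
    congr 1
    rw [← List.getD_eq_getElem _ 0 (by rw [orbit_length hi]; exact ht), orbit_getD hi ht]
  have hPiff : ∀ d : Nat, ((chars.length % d == 0 &&
      (List.range chars.length).all (fun t =>
        chars.getD ((t + d) % chars.length) 'a' == chars.getD t 'a')) = true)
      ↔ (c % d = 0 ∧ Vi l i d) := by
    intro d
    rw [Bool.and_eq_true, Vi_iff_bounded hi d, hclen, ← hc, ← hn]
    simp only [List.all_eq_true, List.mem_range, beq_iff_eq]
    constructor
    · rintro ⟨h0, h⟩
      refine ⟨h0, fun t ht => ?_⟩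
      have h2 := h t ht
      rwa [hget _ (Nat.mod_lt _ hcpos), hget _ ht, pit_mod hi] at h2
    · rintro ⟨h0, h⟩
      refine ⟨h0, fun t ht => ?_⟩
      rw [hget _ (Nat.mod_lt _ hcpos), hget _ ht, pit_mod hi]
      exact h t ht
  unfold periodOf
  rw [find?_range'_eq _ (dmin l i) chars.length 1
      (dmin_pos l i)
      (by rw [hclen, hc, hn]; have := dmin_le_cyc hi; omega)
      ((hPiff _).2 ⟨Nat.dvd_iff_mod_eq_zero.mp (dmin_dvd_cyc hi), dmin_Vi hi⟩)
      (fun e he1 he2 => by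
        cases hPe : (chars.length % e == 0 &&
          (List.range chars.length).all (fun t =>
            chars.getD ((t + e) % chars.length) 'a' == chars.getD t 'a')) with
        | false => rfl
        | true => exact absurd ((hPiff e).1 hPe).2 (dmin_min hi he1 he2))]
  rfl

-- ---- the global word count ----
theorem foldl_lcm_dvd {α : Type} (f : α → Nat) (k : Nat) :
    ∀ (L : List α) (a : Nat), ((L.foldl (fun acc x => Nat.lcm acc (f x)) a) ∣ k
      ↔ a ∣ k ∧ ∀ x ∈ L, f x ∣ k) := by
  intro L
  induction L with
  | nil => simp
  | cons x L ih =>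
    intro a
    simp only [List.foldl_cons, ih, Nat.lcm_dvd_iff, List.mem_cons]
    constructor
    · rintro ⟨⟨h1, h2⟩, h3⟩
      refine ⟨h1, fun y hy => ?_⟩
      rcases hy with rfl | hy
      · exact h2
      · exact h3 y hy
    · rintro ⟨h1, h2⟩
      exact ⟨⟨h1, h2 x (Or.inl rfl)⟩, fun y hy => h2 y (Or.inr hy)⟩

def countOf (l : List Char) : Nat :=
  (List.range l.length).foldl (fun a i => Nat.lcm a (dmin l i)) 1

theorem countOf_dvd_iff (l : List Char) (k : Nat) :
    countOf l ∣ k ↔ ∀ i < l.length, dmin l i ∣ k := by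
  unfold countOf
  rw [foldl_lcm_dvd]
  simp

theorem foldl_lcm_pos (f : Nat → Nat) (hf : ∀ x, 0 < f x) :
    ∀ (L : List Nat) (a : Nat), 0 < a → 0 < L.foldl (fun acc x => Nat.lcm acc (f x)) a := by
  intro L
  induction L with
  | nil => intro a ha; exact ha
  | cons x L ih =>
    intro a ha
    exact ih _ (Nat.lcm_pos ha (hf x))

theorem countOf_pos (l : List Char) : 0 < countOf l := by
  exact foldl_lcm_pos _ (dmin_pos l) _ 1 Nat.one_pos

-- ---- the iterated shuffle ----
def sIter (s : String) : Nat → String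
  | 0 => s
  | k + 1 => suffle (sIter s k)

-- proof-only intermediate: f0, b0, f1, b1, …
def interleave : List Char → List Char → List Char
  | [], ys => ys
  | x :: xs, [] => x :: xs
  | x :: xs, y :: ys => x :: y :: interleave xs ys

theorem assignStep2_length (xs vs : List Char) : (assignStep2 xs vs).length = xs.length := by
  fun_induction assignStep2 <;> simp [*]

theorem interleave_length (f b : List Char) : (interleave f b).length = f.length + b.length := by
  fun_induction interleave <;> (simp [*]; try omega)

theorem interleave_getD (f b : List Char) (i : Nat)
    (hbf : b.length ≤ f.length) (hfb : f.length ≤ b.length + 1) (hi : i < f.length + b.length) :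
    (interleave f b).getD i 'a' =
      if i % 2 = 0 then f.getD (i / 2) 'a' else b.getD (i / 2) 'a' := by
  induction f generalizing b i with
  | nil =>
    simp only [List.length_nil] at hbf hi
    omega
  | cons v f' ih =>
    cases b with
    | nil =>
      have hf' : f' = [] := by
        simp only [List.length_cons, List.length_nil] at hfb
        exact List.eq_nil_of_length_eq_zero (by omega)
      subst hf'
      have : i = 0 := by simp at hi; omega
      subst this
      simp [interleave]
    | cons w b' =>
      simp only [interleave]
      match i with
      | 0 => simp
      | 1 => simp
      | k + 2 =>
        have h1 : (k + 2) % 2 = k % 2 := by omega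
        have h2 : (k + 2) / 2 = k / 2 + 1 := by omega
        simp only [List.getD_cons_succ, h1, h2]
        exact ih b' k (by simp at hbf ⊢; omega) (by simp at hfb ⊢; omega)
          (by simp at hi ⊢; omega)

theorem assign_eq_interleave (f : List Char) : ∀ (l b : List Char),
    f.length = (l.length + 1) / 2 → b.length = l.length - f.length →
    assignOdd (assignStep2 l f) b = interleave f b := by
  induction f with
  | nil =>
    intro l b hf hb
    cases l with
    | nil =>
      cases b with
      | nil => rfl
      | cons w b' => exfalso; simp only [List.length_cons, List.length_nil] at hb; omega
    | cons x l' => exfalso; simp only [List.length_cons, List.length_nil] at hf; omega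
  | cons v f' ih =>
    intro l b hf hb
    cases l with
    | nil => exfalso; simp only [List.length_cons, List.length_nil] at hf; omega
    | cons x l1 =>
      cases l1 with
      | nil =>
        simp only [List.length_cons, List.length_nil] at hf hb
        have hf0 : f' = [] := List.eq_nil_of_length_eq_zero (by omega)
        subst hf0
        have hb0 : b = [] := List.eq_nil_of_length_eq_zero (by omega)
        subst hb0
        rfl
      | cons y l' =>
        simp only [List.length_cons] at hf hb
        have hf' : f'.length = (l'.length + 1) / 2 := by omega
        cases b with
        | nil => exfalso; simp only [List.length_nil] at hb; omega
        | cons w b' =>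
          simp only [List.length_cons] at hb
          have hb' : b'.length = l'.length - f'.length := by omega
          have ihh := ih l' b' hf' hb'
          cases hT : assignStep2 l' f' with
          | nil =>
            have hl0 : l' = [] := List.eq_nil_of_length_eq_zero
              (by rw [← assignStep2_length l' f', hT]; rfl)
            subst hl0
            simp only [List.length_nil] at hf' hb'
            have hf0 : f' = [] := List.eq_nil_of_length_eq_zero (by omega)
            subst hf0
            have hb0 : b' = [] := List.eq_nil_of_length_eq_zero (by omega)
            subst hb0
            rfl
          | cons t T' =>
            rw [hT] at ihh
            simp only [assignOdd] at ihh
            simp only [assignStep2]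
            rw [hT]
            simp only [assignOdd, assignStep2, interleave]
            rw [← ihh]

theorem suffle_toList (w : String) :
    (suffle w).toList = (List.range w.toList.length).map
      (fun i => w.toList.getD (pfun w.toList.length i) 'a') := by
  set l := w.toList with hl
  show (String.ofList (assignOdd (assignStep2 l (l.take ((l.length + 1) / 2)))
      ((l.drop ((l.length + 1) / 2)).reverse))).toList = _
  rw [String.toList_ofList]
  have hm : (l.take ((l.length + 1) / 2)).length = (l.length + 1) / 2 := by
    simp [List.length_take]; omega
  rw [assign_eq_interleave (l.take ((l.length + 1) / 2)) l
      ((l.drop ((l.length + 1) / 2)).reverse)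
      (by rw [hm]) (by simp [List.length_take]; omega)]
  apply List.ext_getElem
  · rw [interleave_length]; simp [List.length_take]; omega
  · intro i h1 h2
    have hn : i < l.length := by
      rw [interleave_length] at h1; simp [List.length_take] at h1; omega
    rw [← List.getD_eq_getElem _ 'a' h1]
    rw [interleave_getD _ _ i (by simp [List.length_take]; omega)
      (by simp [List.length_take]; omega)
      (by simp [List.length_take]; omega)]
    rw [List.getElem_map, List.getElem_range]
    unfold pfun
    by_cases hpar : i % 2 = 0
    · rw [if_pos hpar, if_pos hpar]
      have hlt : i / 2 < (l.take ((l.length + 1) / 2)).length := by rw [hm]; omega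
      rw [List.getD_eq_getElem _ 'a' hlt, List.getElem_take,
        List.getD_eq_getElem _ 'a' (by omega)]
    · rw [if_neg hpar, if_neg hpar]
      have hlt : i / 2 < (l.drop ((l.length + 1) / 2)).reverse.length := by simp; omega
      rw [List.getD_eq_getElem _ 'a' hlt, List.getElem_reverse, List.getElem_drop,
        List.getD_eq_getElem _ 'a' (by omega)]
      congr 1
      simp
      omega

theorem sIter_toList (s : String) (k : Nat) :
    (sIter s k).toList = (List.range s.toList.length).map
      (fun i => s.toList.getD (pit s.toList.length k i) 'a') := by
  induction k with
  | zero =>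
    show s.toList = _
    apply List.ext_getElem (by simp)
    intro j h1 h2
    simp only [List.getElem_map, List.getElem_range]
    rw [show pit s.toList.length 0 j = j from rfl, List.getD_eq_getElem _ 'a' h1]
  | succ k ih =>
    show (suffle (sIter s k)).toList = _
    rw [suffle_toList, ih]
    simp only [List.length_map, List.length_range]
    apply List.ext_getElem (by simp)
    intro j h1 h2
    simp only [List.getElem_map, List.getElem_range]
    have hj : j < s.toList.length := by simpa using h2
    have hpf : pfun s.toList.length j < s.toList.length := pfun_lt hj
    rw [List.getD_eq_getElem _ 'a' (by simpa using hpf)]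
    simp only [List.getElem_map, List.getElem_range]
    rw [pit_comm]
    rfl

theorem sIter_eq_iff (s : String) (k : Nat) :
    sIter s k = s ↔ ∀ i < s.toList.length,
      s.toList.getD (pit s.toList.length k i) 'a' = s.toList.getD i 'a' := by
  rw [← String.toList_inj, sIter_toList]
  constructor
  · intro h i hi
    have h2 := congrArg (fun t : List Char => t.getD i 'a') h
    simp only at h2
    rw [List.getD_eq_getElem _ 'a' (by simpa using hi)] at h2
    simp only [List.getElem_map, List.getElem_range] at h2
    rw [h2, List.getD_eq_getElem _ 'a' hi]
  · intro h
    apply List.ext_getElem (by simp)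
    intro j h1 h2
    simp only [List.getElem_map, List.getElem_range]
    rw [h j (by simpa using h1), List.getD_eq_getElem _ 'a' (by simpa using h1)]

theorem valid_iff_dvd (s : String) (k : Nat) :
    (∀ i < s.toList.length,
        s.toList.getD (pit s.toList.length k i) 'a' = s.toList.getD i 'a')
      ↔ countOf s.toList ∣ k := by
  rw [countOf_dvd_iff]
  constructor
  · intro h i hi
    rw [← Vi_iff_dvd hi]
    intro t
    have h2 := h (pit s.toList.length t i) (pit_lt t hi)
    rwa [← pit_add, Nat.add_comm k t] at h2
  · intro h i hi
    have hv : Vi s.toList i k := (Vi_iff_dvd hi k).2 (h i hi)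
    have h2 := hv 0
    simpa using h2

theorem sIter_eq_iff_dvd (s : String) (k : Nat) : sIter s k = s ↔ countOf s.toList ∣ k := by
  rw [sIter_eq_iff, valid_iff_dvd]

theorem loopA_eq (s : String) :
    ∀ (fuel t : Nat) (acc : List String), t < countOf s.toList →
      countOf s.toList - t ≤ fuel →
      searchLoopA fuel s (sIter s t) acc
        = acc ++ (List.range' (t + 1) (countOf s.toList - (t + 1))).map (fun j => sIter s j) := by
  intro fuel
  induction fuel with
  | zero => intro t acc h1 h2; omega
  | succ fuel ih =>
    intro t acc h1 h2
    show (if s == suffle (sIter s t) then acc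
        else searchLoopA fuel s (suffle (sIter s t)) (acc ++ [suffle (sIter s t)])) = _
    rw [show suffle (sIter s t) = sIter s (t + 1) from rfl]
    by_cases hend : t + 1 = countOf s.toList
    · have hfix : sIter s (t + 1) = s := (sIter_eq_iff_dvd s _).2 (by rw [hend])
      rw [hfix, if_pos (by simp), ← hend]
      simp
    · have hne : ¬ (s = sIter s (t + 1)) := by
        intro h
        have hdvd := (sIter_eq_iff_dvd s (t + 1)).1 h.symm
        have := Nat.le_of_dvd (by omega) hdvd
        omega
      rw [if_neg (by simpa using hne)]
      rw [ih (t + 1) (acc ++ [sIter s (t + 1)]) (by omega) (by omega)]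
      rw [show countOf s.toList - (t + 1) = (countOf s.toList - (t + 2)) + 1 by omega,
        List.range'_succ]
      simp

theorem countOf_dvd_factorial (l : List Char) : countOf l ∣ Nat.factorial l.length := by
  rw [countOf_dvd_iff]
  intro i hi
  exact dvd_trans ((Vi_iff_dvd hi _).1 (Vi_cyc hi))
    (Nat.dvd_factorial (cyc_spec hi).1 (cyc_le hi))

theorem search_eq (s : String) :
    search s = ((countOf s.toList : Int),
      (List.range (countOf s.toList)).map (fun j => sIter s j)) := by
  have hmpos : 0 < countOf s.toList := countOf_pos _
  have hfuel : countOf s.toList ≤ Nat.factorial s.toList.length :=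
    Nat.le_of_dvd (Nat.factorial_pos _) (countOf_dvd_factorial _)
  have hloop := loopA_eq s (Nat.factorial s.toList.length + 1) 0 [s] (by omega) (by omega)
  rw [show sIter s 0 = s from rfl] at hloop
  unfold search
  rw [hloop]
  rw [List.range_eq_range', show countOf s.toList = (countOf s.toList - 1) + 1 by omega,
    List.range'_succ, List.map_cons, show sIter s 0 = s from rfl]
  refine Prod.ext ?_ (by simp)
  show ((([s] ++ (List.range' (0 + 1) (countOf s.toList - (0 + 1))).map
      (fun j => sIter s j)).length : Nat) : Int) = _
  simp only [List.length_append, List.length_map, List.length_range', List.length_cons,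
    List.length_nil]
  push_cast
  omega

-- ---- the cycles/loc decomposition built by B ----
theorem ins_get_mem (c : List Nat) (cs : List Char) :
    ∀ (ts : List Nat) (d : PySem.Dict Nat (List Char × Nat)) (j : Nat) (v : List Char × Nat),
      (ts.foldl (fun d t => d.insert (c.getD t 0) (cs, t)) d).get? j = some v →
      (∃ t ∈ ts, c.getD t 0 = j ∧ v = (cs, t)) ∨ d.get? j = some v := by
  intro ts
  induction ts with
  | nil => intro d j v h; exact Or.inr h
  | cons t ts ih =>
    intro d j v h
    rcases ih _ j v h with h1 | h1
    · obtain ⟨u, hu, h2⟩ := h1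
      exact Or.inl ⟨u, List.mem_cons_of_mem _ hu, h2⟩
    · rw [PySem.Dict.get?_insert] at h1
      split_ifs at h1 with hj
      · exact Or.inl ⟨t, List.mem_cons_self, hj.symm, (Option.some_inj.1 h1).symm⟩
      · exact Or.inr h1

theorem ins_get_some (c : List Nat) (cs : List Char) :
    ∀ (ts : List Nat) (d : PySem.Dict Nat (List Char × Nat)) (j : Nat),
      ((d.get? j).isSome ∨ ∃ t ∈ ts, c.getD t 0 = j) →
      ((ts.foldl (fun d t => d.insert (c.getD t 0) (cs, t)) d).get? j).isSome := by
  intro ts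
  induction ts with
  | nil =>
    rintro d j (h | ⟨t, ht, _⟩)
    · exact h
    · cases ht
  | cons t ts ih =>
    intro d j h
    apply ih
    rcases h with h | ⟨u, hu, hju⟩
    · left
      rw [PySem.Dict.get?_insert]
      split_ifs with hj
      · rfl
      · exact h
    · rcases List.mem_cons.1 hu with rfl | hu2
      · left
        rw [PySem.Dict.get?_insert, if_pos hju.symm]
        rfl
      · exact Or.inr ⟨u, hu2, hju⟩

def BuildInv (l : List Char) (n : Nat)
    (st : List (List Nat) × PySem.Dict Nat (List Char × Nat)) : Prop :=
  (∀ c ∈ st.1, ∃ r, r < n ∧ c = orbit (permOf n) r)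
  ∧ (∀ j v, st.2.get? j = some v →
      ∃ r, r < n ∧ v.1 = (orbit (permOf n) r).map (fun j => l.getD j 'a')
        ∧ orbit (permOf n) r ∈ st.1 ∧ v.2 < cyc n r ∧ pit n v.2 r = j)

theorem buildStep_some (l : List Char) (perm : List Nat)
    (st : List (List Nat) × PySem.Dict Nat (List Char × Nat))
    (x j : Nat) (h : (st.2.get? j).isSome) : ((buildStep l perm st x).2.get? j).isSome := by
  unfold buildStep
  split
  · exact ins_get_some _ _ _ _ _ (Or.inl h)
  · exact h

theorem buildStep_inv {l : List Char} {n x : Nat} (hx : x < n)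
    (st : List (List Nat) × PySem.Dict Nat (List Char × Nat)) (h : BuildInv l n st) :
    BuildInv l n (buildStep l (permOf n) st x) := by
  unfold buildStep
  split
  · constructor
    · intro c hc
      rcases List.mem_append.1 hc with hc | hc
      · exact h.1 c hc
      · rw [List.mem_singleton] at hc
        exact ⟨x, hx, hc⟩
    · intro j v hv
      rcases ins_get_mem _ _ _ _ _ _ hv with ⟨t, ht, hjt, rfl⟩ | hv2
      · have htlen : t < cyc n x := by
          rw [← orbit_length hx]
          exact List.mem_range.1 ht
        refine ⟨x, hx, rfl, List.mem_append_right _ (List.mem_singleton.2 rfl), htlen, ?_⟩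
        rw [← orbit_getD hx htlen, hjt]
      · obtain ⟨r, hr, h1, h2, h3, h4⟩ := h.2 j v hv2
        exact ⟨r, hr, h1, List.mem_append_left _ h2, h3, h4⟩
  · exact h

theorem fold_some (l : List Char) (perm : List Nat) :
    ∀ (xs : List Nat) (st : List (List Nat) × PySem.Dict Nat (List Char × Nat)) (j : Nat),
      (st.2.get? j).isSome → ((xs.foldl (buildStep l perm) st).2.get? j).isSome := by
  intro xs
  induction xs with
  | nil => intro st j h; exact h
  | cons y ys ihy => intro st j h; exact ihy _ j (buildStep_some _ _ _ _ _ h)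

theorem build_fold_inv {l : List Char} {n : Nat} :
    ∀ (xs : List Nat) (st : List (List Nat) × PySem.Dict Nat (List Char × Nat)),
      (∀ x ∈ xs, x < n) → BuildInv l n st →
      BuildInv l n (xs.foldl (buildStep l (permOf n)) st) ∧
      (∀ x ∈ xs, ((xs.foldl (buildStep l (permOf n)) st).2.get? x).isSome) := by
  intro xs
  induction xs with
  | nil =>
    intro st _ h
    exact ⟨h, by simp⟩
  | cons x xs ih =>
    intro st hxs hinv
    have hx : x < n := hxs x List.mem_cons_self
    obtain ⟨i1, i3⟩ := ih (buildStep l (permOf n) st x)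
      (fun y hy => hxs y (List.mem_cons_of_mem _ hy)) (buildStep_inv hx st hinv)
    refine ⟨i1, ?_⟩
    intro y hy
    rcases List.mem_cons.1 hy with rfl | hy2
    · rw [List.foldl_cons]
      apply fold_some
      unfold buildStep
      split
      · apply ins_get_some
        right
        refine ⟨0, List.mem_range.2 (by simp [orbit]), rfl⟩
      · rename_i hne
        cases ho : st.2.get? y with
        | none => rw [ho] at hne; simp at hne
        | some v => simp
    · exact i3 y hy2

theorem build_spec (l : List Char) (n : Nat) :
    BuildInv l n (buildCycles l (permOf n) n) ∧
    (∀ i < n, ((buildCycles l (permOf n) n).2.get? i).isSome) := by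
  unfold buildCycles
  have hinv0 : BuildInv l n ([], PySem.Dict.empty) := by
    constructor
    · simp
    · intro j v h
      rw [PySem.Dict.get?_empty] at h
      cases h
  obtain ⟨i1, i3⟩ := build_fold_inv (List.range n) _ (fun x hx => List.mem_range.1 hx) hinv0
  exact ⟨i1, fun i hi => i3 i (List.mem_range.2 hi)⟩

-- dmin is constant along a cycle
theorem Vi_shift {l : List Char} {r t i : Nat} (hr : r < l.length)
    (ht : t ≤ cyc l.length r) (hti : pit l.length t r = i) (d : Nat) :
    Vi l i d ↔ Vi l r d := by
  have key : ∀ x, pit l.length (x + t) r = pit l.length x i := by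
    intro x
    rw [← hti, ← pit_add]
  have hcyc : ∀ x, pit l.length (x + cyc l.length r) r = pit l.length x r := by
    intro x
    rw [pit_add, (cyc_spec hr).2]
  constructor
  · intro h u
    have h2 := h (u + (cyc l.length r - t))
    rw [← key, ← key] at h2
    rw [show u + (cyc l.length r - t) + d + t = u + d + cyc l.length r by omega,
      show u + (cyc l.length r - t) + t = u + cyc l.length r by omega, hcyc, hcyc] at h2
    exact h2
  · intro h u
    rw [← key, ← key, show u + d + t = u + t + d by omega]
    exact h (u + t)

theorem dmin_shift {l : List Char} {r t i : Nat} (hr : r < l.length)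
    (ht : t ≤ cyc l.length r) (hti : pit l.length t r = i) : dmin l i = dmin l r := by
  have hi : i < l.length := hti ▸ pit_lt t hr
  apply Nat.dvd_antisymm
  · exact (Vi_iff_dvd hi _).1 ((Vi_shift hr ht hti _).2 (dmin_Vi hr))
  · exact (Vi_iff_dvd hr _).1 ((Vi_shift hr ht hti _).1 (dmin_Vi hi))

theorem altCount_eq (l : List Char) :
    altCount l (buildCycles l (permOf l.length) l.length).1 = countOf l := by
  obtain ⟨⟨hc1, hc2⟩, htot⟩ := build_spec l l.length
  have hA : ∀ k, altCount l (buildCycles l (permOf l.length) l.length).1 ∣ k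
      ↔ ∀ c ∈ (buildCycles l (permOf l.length) l.length).1,
        periodOf (c.map (fun j => l.getD j 'a')) ∣ k := by
    intro k
    unfold altCount
    rw [foldl_lcm_dvd]
    simp
  apply Nat.dvd_antisymm
  · rw [hA]
    intro c hc
    obtain ⟨r, hr, rfl⟩ := hc1 c hc
    rw [periodOf_eq hr]
    exact (countOf_dvd_iff l _).1 dvd_rfl r hr
  · rw [countOf_dvd_iff]
    intro i hi
    obtain ⟨v, hv⟩ := Option.isSome_iff_exists.1 (htot i hi)
    obtain ⟨r, hr, h1, h2, h3, h4⟩ := hc2 i v hv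
    rw [dmin_shift hr (le_of_lt h3) h4, ← periodOf_eq hr]
    exact (hA _).1 dvd_rfl _ h2

-- element x of the m-fold repetition of cs is cs[x % len cs]
theorem flatten_replicate_getD (cs : List Char) :
    ∀ (m x : Nat), x < m * cs.length →
      ((List.replicate m cs).flatten).getD x ' ' = cs.getD (x % cs.length) ' ' := by
  intro m
  induction m with
  | zero => intro x hx; omega
  | succ m ih =>
    intro x hx
    rw [Nat.succ_mul] at hx
    rw [List.replicate_succ, List.flatten_cons]
    by_cases hxl : x < cs.length
    · rw [List.getD_append _ _ _ _ hxl, Nat.mod_eq_of_lt hxl]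
    · have hlen : 0 < cs.length := by
        rcases Nat.eq_zero_or_pos cs.length with h0 | h0
        · rw [h0, Nat.mul_zero] at hx
          omega
        · exact h0
      rw [List.getD_append_right _ _ _ _ (by omega),
        ih (x - cs.length) (by omega)]
      congr 1
      conv_rhs => rw [show x = (x - cs.length) + cs.length by omega]
      rw [Nat.add_mod_right]

theorem colOf_getD (s : String) (count : Nat) {i k : Nat}
    (hi : i < s.toList.length) (hk : k < count) :
    (colOf (buildCycles s.toList (permOf s.toList.length) s.toList.length).2 count i).getD k ' '
      = s.toList.getD (pit s.toList.length k i) 'a' := by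
  obtain ⟨⟨hc1, hc2⟩, htot⟩ := build_spec s.toList s.toList.length
  obtain ⟨v, hv⟩ := Option.isSome_iff_exists.1 (htot i hi)
  obtain ⟨r, hr, h1, h2, h3, h4⟩ := hc2 i v hv
  have hL : v.1.length = cyc s.toList.length r := by
    rw [h1, List.length_map, orbit_length hr]
  have hLpos : 0 < v.1.length := by
    rw [hL]
    exact (cyc_spec hr).1
  unfold colOf
  simp only [hv, Option.getD_some]
  have hbig : v.2 + k < (count / v.1.length + 2) * v.1.length := by
    have h1 : v.1.length * (count / v.1.length) + count % v.1.length = count :=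
      Nat.div_add_mod count v.1.length
    have h2 : count % v.1.length < v.1.length := Nat.mod_lt _ hLpos
    have ht2 : v.2 < v.1.length := by rw [hL]; exact h3
    rw [Nat.add_mul, Nat.mul_comm (count / v.1.length) v.1.length]
    omega
  have hlenflat : ((List.replicate (count / v.1.length + 2) v.1).flatten).length
      = (count / v.1.length + 2) * v.1.length := by
    simp [List.length_flatten, List.map_replicate, List.sum_replicate]
  rw [List.getD_eq_getElem _ ' ' (by
    simp only [List.length_take, List.length_drop, hlenflat]
    omega)]
  rw [List.getElem_take, List.getElem_drop,
    ← List.getD_eq_getElem _ ' ' (by rw [hlenflat]; omega)]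
  rw [flatten_replicate_getD _ _ _ hbig]
  rw [hL]
  have hmod : (v.2 + k) % cyc s.toList.length r < cyc s.toList.length r :=
    Nat.mod_lt _ (cyc_spec hr).1
  rw [h1, List.getD_eq_getElem _ ' ' (by rw [List.length_map, orbit_length hr]; exact hmod)]
  simp only [List.getElem_map]
  rw [← List.getD_eq_getElem _ 0 (by rw [orbit_length hr]; exact hmod),
    orbit_getD hr hmod, pit_mod hr, Nat.add_comm v.2 k, pit_add, h4]

theorem sIter_empty (s : String) (hs : s.toList.length = 0) (k : Nat) : sIter s k = "" := by
  rw [← String.toList_inj, sIter_toList, hs]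
  rfl

theorem altWords_eq (s : String) :
    altWords (buildCycles s.toList (permOf s.toList.length) s.toList.length).2
        s.toList.length (countOf s.toList)
      = (List.range (countOf s.toList)).map (fun j => sIter s j) := by
  unfold altWords
  by_cases hn : s.toList.length = 0
  · rw [if_pos (by
      simp only [List.isEmpty_iff, List.map_eq_nil_iff, List.range_eq_nil]
      exact hn)]
    apply List.ext_getElem (by simp)
    intro j h1 h2
    rw [List.getElem_replicate, List.getElem_map, sIter_empty s hn]
  · rw [if_neg (by
      simp only [List.isEmpty_iff, List.map_eq_nil_iff, List.range_eq_nil]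
      exact hn)]
    apply List.map_congr_left
    intro k hk
    have hkc := List.mem_range.1 hk
    have hcol : ((List.range s.toList.length).map (fun i =>
          colOf (buildCycles s.toList (permOf s.toList.length) s.toList.length).2
            (countOf s.toList) i)).map (fun col => col.getD k ' ')
        = (sIter s k).toList := by
      rw [sIter_toList, List.map_map]
      apply List.map_congr_left
      intro i hi
      exact colOf_getD s _ (List.mem_range.1 hi) hkc
    rw [hcol, String.ofList_toList]

theorem search_alt_eq (s : String) :
    search_alt s = ((countOf s.toList : Int),
      (List.range (countOf s.toList)).map (fun j => sIter s j)) := by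
  show ((altCount s.toList (buildCycles s.toList (permOf s.toList.length) s.toList.length).1 : Int),
    altWords (buildCycles s.toList (permOf s.toList.length) s.toList.length).2 s.toList.length
      (altCount s.toList (buildCycles s.toList (permOf s.toList.length) s.toList.length).1)) = _
  rw [altCount_eq, altWords_eq]

-- ===== VERDICT (by name: the statement is the Claim_ definition above) =====
theorem search_spec : Claim_equal_search := by
  intro s _
  unfold Spec_search
  rw [search_eq, search_alt_eq]
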